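-- pv_equiv track=rewrite | github.com/trinkner/yearbirder | src/code_Graphs.py | _build_cumulative_data
-- ===== SOURCE A (Python) =====
-- from collections import defaultdict
--
-- def _build_cumulative_data(sightings):
--     daily = defaultdict(set)
--     for s in sightings:
--         daily[s["date"]].add(s["commonName"])
--
--     # Build taxonomic index once — _taxo_sort would rebuild it on every call,
--     # which is O(|sightings|) × |dates| and very slow on large unfiltered datasets.
--     taxo_index = {}
--     for i, s in enumerate(sightings):
--         name = s["commonName"]
--         if name not in taxo_index:
--             taxo_index[name] = i
--
--     dates = sorted(daily.keys())
--     seen = set()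
--     counts = []
--     new_species = []
--     for d in dates:
--         new_sp = daily[d] - seen
--         new_species.append(sorted(new_sp, key=lambda sp: taxo_index.get(sp, 999999)))
--         seen |= daily[d]
--         counts.append(len(seen))
--     return dates, counts, new_species, "Cumulative Species"
-- ===== SOURCE B (Python) =====
-- def _build_cumulative_data(sightings):
--     # One pass: earliest date per species + species in first-occurrence order.
--     first_date = {}
--     species_order = []
--     for s in sightings:
--         name = s["commonName"]
--         d = s["date"]
--         prev = first_date.get(name)
--         if prev is None:
--             first_date[name] = d
--             species_order.append(name)
--         elif d < prev:
--             first_date[name] = d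
--
--     dates = sorted({s["date"] for s in sightings})
--     # A species is "new" exactly on its earliest date; species_order is
--     # first-occurrence order, which is increasing taxonomic-index order.
--     new_species = [[sp for sp in species_order if first_date[sp] == d]
--                    for d in dates]
--     counts = []
--     total = 0
--     for bucket in new_species:
--         total += len(bucket)
--         counts.append(total)
--     return dates, counts, new_species, "Cumulative Species"
-- ===== Notes on version B (the rewrite author's own statement) =====
-- stated objective: alternative
-- what changed: Instead of sweeping sorted dates with a growing 'seen' set, per-date set differences and a taxonomic-key sort per date, B computes each species' earliest date and first-occurrence order in one pass, builds each date's bucket by filtering the first-occurrence list (already in taxonomic-index order, so no sort), and gets counts as a running sum of bucket sizes.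
import Mathlib
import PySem

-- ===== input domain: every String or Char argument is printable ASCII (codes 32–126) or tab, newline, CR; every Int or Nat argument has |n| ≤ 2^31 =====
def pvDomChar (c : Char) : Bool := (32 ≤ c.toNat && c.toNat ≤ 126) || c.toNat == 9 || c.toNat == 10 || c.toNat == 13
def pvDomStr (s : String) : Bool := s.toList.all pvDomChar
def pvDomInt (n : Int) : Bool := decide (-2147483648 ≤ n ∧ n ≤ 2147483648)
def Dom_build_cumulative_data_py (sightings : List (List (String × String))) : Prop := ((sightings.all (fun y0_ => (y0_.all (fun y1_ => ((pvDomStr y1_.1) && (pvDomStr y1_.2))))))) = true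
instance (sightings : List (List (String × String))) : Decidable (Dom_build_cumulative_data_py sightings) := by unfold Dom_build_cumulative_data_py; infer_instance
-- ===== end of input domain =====

-- B replaces A's sorted-date sweep with a growing 'seen' set (set difference + per-date
-- taxonomic sort) by a one-pass earliest-date-per-species map plus first-occurrence order,
-- grouping species under their earliest date and summing bucket sizes (alternative algorithm,
-- similar cost).  The inner sorted(new_sp, key=…) of A is order-exact here because the sort
-- key (first-occurrence index) is injective on every set it is applied to.

-- ===== PORT A =====
def build_cumulative_data_py (sightings : List (List (String × String))) : List String × List Int × List (List String) × String :=
  let daily : PySem.Dict String (PySem.Set String) :=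
    sightings.foldl (fun d s =>
      d.modify ((PySem.Dict.ofList s).getD "date" "") PySem.Set.empty
        (fun st => PySem.Set.add st ((PySem.Dict.ofList s).getD "commonName" ""))) PySem.Dict.empty
  let taxo : PySem.Dict String Int :=
    (PySem.List.enumerate sightings 0).foldl (fun t p =>
      if t.contains ((PySem.Dict.ofList p.2).getD "commonName" "") then t
      else t.insert ((PySem.Dict.ofList p.2).getD "commonName" "") p.1) PySem.Dict.empty
  let dates : List String := PySem.List.sorted daily.keys (fun x => x) false
  let r := dates.foldl (fun (st : PySem.Set String × List Int × List (List String)) d =>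
      let dayset := daily.getD d PySem.Set.empty
      let newSp := PySem.Set.diff dayset st.1
      let sortedNew := PySem.List.sorted newSp (fun sp => taxo.getD sp 999999) false
      let seen' := PySem.Set.union st.1 dayset
      (seen', st.2.1 ++ [PySem.Set.len seen'], st.2.2 ++ [sortedNew]))
    (PySem.Set.empty, [], [])
  (dates, r.2.1, r.2.2, "Cumulative Species")

-- ===== PORT B =====
def build_cumulative_data_py_alt (sightings : List (List (String × String))) : List String × List Int × List (List String) × String :=
  let st := sightings.foldl (fun (st : PySem.Dict String String × List String) s =>
      match st.1.get? ((PySem.Dict.ofList s).getD "commonName" "") with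
      | none => (st.1.insert ((PySem.Dict.ofList s).getD "commonName" "")
                   ((PySem.Dict.ofList s).getD "date" ""),
                 st.2 ++ [(PySem.Dict.ofList s).getD "commonName" ""])
      | some prev => (if (PySem.Dict.ofList s).getD "date" "" < prev then
                        st.1.insert ((PySem.Dict.ofList s).getD "commonName" "")
                          ((PySem.Dict.ofList s).getD "date" "")
                      else st.1, st.2))
    (PySem.Dict.empty, [])
  let firstDate := st.1
  let speciesOrder := st.2
  let dates := PySem.List.sorted
    (PySem.Set.ofList (sightings.map (fun s => (PySem.Dict.ofList s).getD "date" "")))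
    (fun x => x) false
  let newSpecies := dates.map (fun d => speciesOrder.filter (fun sp => firstDate.getD sp "" == d))
  let counts := (newSpecies.foldl (fun (acc : List Int × Int) b =>
      (acc.1 ++ [acc.2 + PySem.List.len b], acc.2 + PySem.List.len b)) ([], 0)).1
  (dates, counts, newSpecies, "Cumulative Species")

-- ===== PRECONDITION & SPEC =====
-- Pre_: exactly the inputs on which the Python A returns normally — every sighting dict has
-- the keys "date" and "commonName" (otherwise Python raises KeyError).  The two ports happen
-- to agree on all inputs, so the equivalence proof itself needs no hypothesis from it.
def Pre_build_cumulative_data_py (sightings : List (List (String × String))) : Prop :=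
  (sightings.all (fun s => (PySem.Dict.ofList s).contains "date" && (PySem.Dict.ofList s).contains "commonName")) = true
instance (sightings : List (List (String × String))) : Decidable (Pre_build_cumulative_data_py sightings) := by unfold Pre_build_cumulative_data_py; infer_instance
def pvWitness_build_cumulative_data_py : (List (List (String × String))) :=
  [[("date", "2024-01-02"), ("commonName", "robin")], [("date", "2024-01-01"), ("commonName", "robin")]]
def Spec_build_cumulative_data_py (sightings : List (List (String × String))) (out : List String × List Int × List (List String) × String) : Prop := out = build_cumulative_data_py_alt sightings
instance (sightings : List (List (String × String))) (out : List String × List Int × List (List String) × String) : Decidable (Spec_build_cumulative_data_py sightings out) := by unfold Spec_build_cumulative_data_py; infer_instance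

-- ===== CLAIM (what is proved, stated in full; the proofs are below) =====
def Claim_equal_build_cumulative_data_py : Prop := ∀ (sightings : List (List (String × String))), Dom_build_cumulative_data_py sightings → Pre_build_cumulative_data_py sightings → Spec_build_cumulative_data_py sightings (build_cumulative_data_py sightings)

-- ===== LEMMAS AND PROOFS =====

-- Shorthands for the two fields of a sighting (definitionally the expressions in the ports).
def pvN (s : List (String × String)) : String := (PySem.Dict.ofList s).getD "commonName" ""
def pvD (s : List (String × String)) : String := (PySem.Dict.ofList s).getD "date" ""

-- A-side objects
def pvDaily (L : List (List (String × String))) : PySem.Dict String (PySem.Set String) :=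
  L.foldl (fun d s => d.modify (pvD s) PySem.Set.empty (fun st => PySem.Set.add st (pvN s))) PySem.Dict.empty
def pvTaxo (L : List (List (String × String))) : PySem.Dict String Int :=
  (PySem.List.enumerate L 0).foldl (fun t p =>
    if t.contains (pvN p.2) then t else t.insert (pvN p.2) p.1) PySem.Dict.empty
def pvKey (L : List (List (String × String))) (sp : String) : Int := (pvTaxo L).getD sp 999999
def pvStepA (L : List (List (String × String))) (st : PySem.Set String × List Int × List (List String)) (d : String) :
    PySem.Set String × List Int × List (List String) :=
  (PySem.Set.union st.1 ((pvDaily L).getD d PySem.Set.empty),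
   st.2.1 ++ [PySem.Set.len (PySem.Set.union st.1 ((pvDaily L).getD d PySem.Set.empty))],
   st.2.2 ++ [PySem.List.sorted (PySem.Set.diff ((pvDaily L).getD d PySem.Set.empty) st.1)
                (fun sp => (pvTaxo L).getD sp 999999) false])

-- B-side objects
def pvStepB (st : PySem.Dict String String × List String) (s : List (String × String)) :
    PySem.Dict String String × List String :=
  match st.1.get? (pvN s) with
  | none => (st.1.insert (pvN s) (pvD s), st.2 ++ [pvN s])
  | some prev => (if pvD s < prev then st.1.insert (pvN s) (pvD s) else st.1, st.2)
def pvBst (L : List (List (String × String))) : PySem.Dict String String × List String :=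
  L.foldl pvStepB (PySem.Dict.empty, [])
def pvFd (L : List (List (String × String))) (sp : String) : String := (pvBst L).1.getD sp ""
def pvOrd (L : List (List (String × String))) : List String := (pvBst L).2
def pvDates (L : List (List (String × String))) : List String :=
  PySem.List.sorted (PySem.Set.ofList (L.map pvD)) (fun x => x) false
def pvBucket (L : List (List (String × String))) (d : String) : List String :=
  (pvOrd L).filter (fun sp => (pvBst L).1.getD sp "" == d)
def pvCounts : List (List String) → Int → List Int
  | [], _ => []
  | b :: bs, t => (t + PySem.List.len b) :: pvCounts bs (t + PySem.List.len b)

-- the ports, re-stated through the named objects (definitional)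
lemma portA_eq (L : List (List (String × String))) :
    build_cumulative_data_py L =
      (PySem.List.sorted (pvDaily L).keys (fun x => x) false,
       ((PySem.List.sorted (pvDaily L).keys (fun x => x) false).foldl (pvStepA L) (PySem.Set.empty, [], [])).2.1,
       ((PySem.List.sorted (pvDaily L).keys (fun x => x) false).foldl (pvStepA L) (PySem.Set.empty, [], [])).2.2,
       "Cumulative Species") := rfl

lemma portB_eq (L : List (List (String × String))) :
    build_cumulative_data_py_alt L =
      (pvDates L,
       ((pvDates L).map (pvBucket L)).foldl (fun (acc : List Int × Int) b =>
          (acc.1 ++ [acc.2 + PySem.List.len b], acc.2 + PySem.List.len b)) ([], 0) |>.1,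
       (pvDates L).map (pvBucket L),
       "Cumulative Species") := rfl

-- B's counts loop is the running-total list
lemma countsB_eq (bs : List (List String)) : ∀ (cs : List Int) (t : Int),
    (bs.foldl (fun (acc : List Int × Int) b =>
       (acc.1 ++ [acc.2 + PySem.List.len b], acc.2 + PySem.List.len b)) (cs, t)).1
      = cs ++ pvCounts bs t := by
  induction bs with
  | nil => intro cs t; simp [pvCounts]
  | cons b bs ih =>
    intro cs t
    simp only [List.foldl_cons]
    rw [ih]
    simp [pvCounts]

-- daily: value at key d collects the names sighted on date d
lemma daily_getD (L : List (List (String × String))) :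
    ∀ (dct : PySem.Dict String (PySem.Set String)) (dd : String),
      (L.foldl (fun d s => d.modify (pvD s) PySem.Set.empty (fun st => PySem.Set.add st (pvN s))) dct).getD dd PySem.Set.empty
        = PySem.Set.update (dct.getD dd PySem.Set.empty) ((L.filter (fun s => pvD s == dd)).map pvN) := by
  induction L with
  | nil => intro dct dd; simp [PySem.Set.update_nil]
  | cons x t ih =>
    intro dct dd
    simp only [List.foldl_cons, List.filter_cons]
    rw [ih]
    rw [PySem.Dict.getD_modify]
    by_cases h : dd = pvD x
    · subst h
      simp only [beq_self_eq_true, if_true, List.map_cons, PySem.Set.update_cons]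
    · have hb : (pvD x == dd) = false := by rw [beq_eq_false_iff_ne]; exact fun e => h e.symm
      simp only [if_neg h, hb, Bool.false_eq_true, if_false]

lemma daily_mem (L : List (List (String × String))) (dd x : String) :
    x ∈ (pvDaily L).getD dd PySem.Set.empty ↔ ∃ s ∈ L, pvD s = dd ∧ pvN s = x := by
  unfold pvDaily
  rw [daily_getD]
  simp only [PySem.Dict.getD_empty]
  simp only [PySem.Set.mem_update, PySem.Set.empty, List.not_mem_nil, false_or,
    List.mem_map, List.mem_filter, beq_iff_eq]
  constructor
  · rintro ⟨s, ⟨hs, hd⟩, hn⟩; exact ⟨s, hs, hd, hn⟩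
  · rintro ⟨s, hs, hd, hn⟩; exact ⟨s, ⟨hs, hd⟩, hn⟩

lemma daily_nodup (L : List (List (String × String))) (dd : String) :
    ((pvDaily L).getD dd PySem.Set.empty).Nodup := by
  unfold pvDaily
  rw [daily_getD]
  simp only [PySem.Dict.getD_empty]
  exact PySem.Set.nodup_ofList _

lemma daily_keys (L : List (List (String × String))) :
    (pvDaily L).keys = PySem.Set.ofList (L.map pvD) := by
  have h := PySem.Dict.keys_foldl_modify_key (l := L) (key := pvD)
      (d0 := PySem.Set.empty) (f := fun _ s st => PySem.Set.add st (pvN s)) (d := PySem.Dict.empty)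
  simpa [pvDaily, PySem.Dict.keys_empty, PySem.Set.update_nil_left] using h

-- taxo: first-occurrence index table; strictly increasing values along its keys
lemma taxo_inv (L : List (List (String × String))) :
    ∀ (s0 : Int) (t : PySem.Dict String Int),
      t.keys.Nodup → (t.items.map (·.2)).Pairwise (· < ·) → (∀ v ∈ t.items.map (·.2), v < s0) →
      (((PySem.List.enumerate L s0).foldl (fun t p =>
          if t.contains (pvN p.2) then t else t.insert (pvN p.2) p.1) t).keys
          = PySem.Set.update t.keys (L.map pvN))
      ∧ ((PySem.List.enumerate L s0).foldl (fun t p =>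
          if t.contains (pvN p.2) then t else t.insert (pvN p.2) p.1) t).keys.Nodup
      ∧ (((PySem.List.enumerate L s0).foldl (fun t p =>
          if t.contains (pvN p.2) then t else t.insert (pvN p.2) p.1) t).items.map (·.2)).Pairwise (· < ·)
      ∧ (∀ v ∈ (((PySem.List.enumerate L s0).foldl (fun t p =>
          if t.contains (pvN p.2) then t else t.insert (pvN p.2) p.1) t).items.map (·.2)), v < s0 + L.length) := by
  induction L with
  | nil =>
    intro s0 t h1 h2 h3
    refine ⟨by simp [PySem.Set.update_nil], h1, h2, ?_⟩
    intro v hv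
    have := h3 v hv
    simpa using lt_of_lt_of_le this (by omega)
  | cons x tl ih =>
    intro s0 t h1 h2 h3
    have hcons : PySem.List.enumerate (x :: tl) s0 = (s0, x) :: PySem.List.enumerate tl (s0 + 1) := rfl
    rw [hcons]
    simp only [List.foldl_cons]
    by_cases hc : t.contains (pvN x) = true
    · rw [if_pos hc]
      have hb : ∀ v ∈ t.items.map (·.2), v < s0 + 1 := fun v hv => lt_trans (h3 v hv) (by omega)
      obtain ⟨c1, c2, c3, c4⟩ := ih (s0 + 1) t h1 h2 hb
      have hmem : pvN x ∈ t.keys := (PySem.Dict.contains_iff_mem_keys t _).1 hc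
      refine ⟨?_, c2, c3, ?_⟩
      · rw [c1]
        simp only [List.map_cons, PySem.Set.update_cons, PySem.Set.add_of_mem hmem]
      · intro v hv
        have := c4 v hv
        simp only [List.length_cons]
        omega
    · rw [if_neg hc]
      have hcf : t.contains (pvN x) = false := by revert hc; cases t.contains (pvN x) <;> simp
      have hnm : pvN x ∉ t.keys := fun hm => hc ((PySem.Dict.contains_iff_mem_keys t _).2 hm)
      have hkeys : (t.insert (pvN x) s0).keys = t.keys ++ [pvN x] :=
        PySem.Dict.keys_insert_of_not_contains t s0 hcf
      have hitems : (t.insert (pvN x) s0).items = t.items ++ [(pvN x, s0)] :=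
        PySem.Dict.items_insert_of_not_contains t s0 hcf
      have hnd' : (t.insert (pvN x) s0).keys.Nodup := PySem.Dict.nodup_keys_insert t _ _ h1
      have hpw' : ((t.insert (pvN x) s0).items.map (·.2)).Pairwise (· < ·) := by
        rw [hitems]
        simp only [List.map_append, List.map_cons, List.map_nil]
        rw [List.pairwise_append]
        exact ⟨h2, List.pairwise_singleton _ _, fun a ha b hb => by
          simp only [List.mem_cons, List.not_mem_nil, or_false] at hb
          subst hb; exact h3 a ha⟩
      have hb' : ∀ v ∈ (t.insert (pvN x) s0).items.map (·.2), v < s0 + 1 := by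
        rw [hitems]
        intro v hv
        simp only [List.map_append, List.map_cons, List.map_nil, List.mem_append,
          List.mem_cons, List.not_mem_nil, or_false] at hv
        rcases hv with hv | hv
        · exact lt_trans (h3 v hv) (by omega)
        · subst hv; omega
      obtain ⟨c1, c2, c3, c4⟩ := ih (s0 + 1) (t.insert (pvN x) s0) hnd' hpw' hb'
      refine ⟨?_, c2, c3, ?_⟩
      · rw [c1, hkeys]
        simp only [List.map_cons, PySem.Set.update_cons, PySem.Set.add_of_not_mem hnm]
      · intro v hv
        have := c4 v hv
        simp only [List.length_cons]
        omega

lemma taxo_pairwise (L : List (List (String × String))) :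
    (PySem.Set.ofList (L.map pvN)).Pairwise (fun a b => pvKey L a < pvKey L b) := by
  have hE : (PySem.Dict.empty : PySem.Dict String Int).items = [] := rfl
  have hK : (PySem.Dict.empty : PySem.Dict String Int).keys = [] := rfl
  obtain ⟨c1, c2, c3, _⟩ := taxo_inv L 0 PySem.Dict.empty (by rw [hK]; exact List.nodup_nil)
    (by rw [hE]; simp) (by rw [hE]; simp)
  have hkeys : (pvTaxo L).keys = PySem.Set.ofList (L.map pvN) := by
    unfold pvTaxo
    rw [c1, hK, PySem.Set.update_nil_left]
  have hpitems : (pvTaxo L).items.Pairwise (fun p q => p.2 < q.2) := by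
    have := c3
    rw [List.pairwise_map] at this
    exact this
  have hpitems' : (pvTaxo L).items.Pairwise (fun p q => pvKey L p.1 < pvKey L q.1) := by
    refine hpitems.imp_of_mem ?_
    intro a b ha hb hab
    have hva : pvKey L a.1 = a.2 := PySem.Dict.getD_of_mem_items (pvTaxo L) (by exact ha) c2 999999
    have hvb : pvKey L b.1 = b.2 := PySem.Dict.getD_of_mem_items (pvTaxo L) (by exact hb) c2 999999
    rw [hva, hvb]; exact hab
  have : ((pvTaxo L).items.map (·.1)).Pairwise (fun a b => pvKey L a < pvKey L b) := by
    rw [List.pairwise_map]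
    exact hpitems'
  rw [← hkeys]
  exact this

-- B's first pass: species order and earliest dates
lemma bfold_inv (L : List (List (String × String))) :
    ∀ (m : PySem.Dict String String) (ord : List String), ord = m.keys → m.keys.Nodup →
      ((L.foldl pvStepB (m, ord)).2 = (L.foldl pvStepB (m, ord)).1.keys)
      ∧ ((L.foldl pvStepB (m, ord)).1.keys = PySem.Set.update ord (L.map pvN))
      ∧ ((L.foldl pvStepB (m, ord)).1.keys.Nodup)
      ∧ (∀ sp v, (L.foldl pvStepB (m, ord)).1.get? sp = some v →
           (m.get? sp = some v ∨ ∃ s ∈ L, pvN s = sp ∧ pvD s = v))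
      ∧ (∀ s ∈ L, ∀ v, (L.foldl pvStepB (m, ord)).1.get? (pvN s) = some v → v ≤ pvD s)
      ∧ (∀ sp v0, m.get? sp = some v0 → ∀ v, (L.foldl pvStepB (m, ord)).1.get? sp = some v → v ≤ v0) := by
  induction L with
  | nil =>
    intro m ord he hn
    subst he
    refine ⟨rfl, by simp [PySem.Set.update_nil], hn, ?_, ?_, ?_⟩
    · intro sp v h; exact Or.inl h
    · intro s hs; cases hs
    · intro sp v0 h0 v hv
      simp only [List.foldl_nil] at hv
      rw [h0] at hv
      exact le_of_eq (Option.some.inj hv).symm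
  | cons s tl ih =>
    intro m ord he hn
    simp only [List.foldl_cons]
    cases hm : m.get? (pvN s) with
    | none =>
      have hstep : pvStepB (m, ord) s = (m.insert (pvN s) (pvD s), ord ++ [pvN s]) := by
        unfold pvStepB; rw [hm]
      rw [hstep]
      have hcf : m.contains (pvN s) = false := (PySem.Dict.get?_eq_none_iff_contains m _).1 hm
      have hnm : pvN s ∉ m.keys := (PySem.Dict.get?_eq_none_iff_not_mem_keys m _).1 hm
      have hkeys : (m.insert (pvN s) (pvD s)).keys = m.keys ++ [pvN s] :=
        PySem.Dict.keys_insert_of_not_contains m _ hcf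
      have hnd' : (m.insert (pvN s) (pvD s)).keys.Nodup := PySem.Dict.nodup_keys_insert m _ _ hn
      have he' : ord ++ [pvN s] = (m.insert (pvN s) (pvD s)).keys := by rw [hkeys, he]
      obtain ⟨c1, c2, c3, c4, c5, c6⟩ := ih (m.insert (pvN s) (pvD s)) (ord ++ [pvN s]) he' hnd'
      refine ⟨c1, ?_, c3, ?_, ?_, ?_⟩
      · rw [c2]
        have hadd : PySem.Set.add ord (pvN s) = ord ++ [pvN s] :=
          PySem.Set.add_of_not_mem (he ▸ hnm)
        simp only [List.map_cons, PySem.Set.update_cons, hadd]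
      · intro sp v hv
        rcases c4 sp v hv with h | ⟨s', hs', h1, h2⟩
        · rw [PySem.Dict.get?_insert] at h
          by_cases hsp : sp = pvN s
          · rw [if_pos hsp] at h
            exact Or.inr ⟨s, List.mem_cons_self .., hsp.symm, Option.some.inj h⟩
          · rw [if_neg hsp] at h
            exact Or.inl h
        · exact Or.inr ⟨s', List.mem_cons_of_mem _ hs', h1, h2⟩
      · intro s' hs' v hv
        rcases List.mem_cons.1 hs' with rfl | hmem2
        · have h1 : (m.insert (pvN s') (pvD s')).get? (pvN s') = some (pvD s') :=
            PySem.Dict.get?_insert_self ..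
          exact c6 _ _ h1 v hv
        · exact c5 s' hmem2 v hv
      · intro sp v0 h0 v hv
        have hsp : sp ≠ pvN s := by
          intro e; rw [e, hm] at h0; cases h0
        have h0' : (m.insert (pvN s) (pvD s)).get? sp = some v0 := by
          rw [PySem.Dict.get?_insert, if_neg hsp]; exact h0
        exact c6 sp v0 h0' v hv
    | some prev =>
      have hc : m.contains (pvN s) = true := by
        rw [PySem.Dict.contains_eq_isSome_get?, hm]; rfl
      have hmemk : pvN s ∈ m.keys := (PySem.Dict.contains_iff_mem_keys m _).1 hc
      have hadd : PySem.Set.add ord (pvN s) = ord := PySem.Set.add_of_mem (he ▸ hmemk)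
      by_cases hlt : pvD s < prev
      · have hstep : pvStepB (m, ord) s = (m.insert (pvN s) (pvD s), ord) := by
          unfold pvStepB; rw [hm]; simp [hlt]
        rw [hstep]
        have hkeys : (m.insert (pvN s) (pvD s)).keys = m.keys :=
          PySem.Dict.keys_insert_of_contains m _ hc
        have he' : ord = (m.insert (pvN s) (pvD s)).keys := by rw [hkeys]; exact he
        have hnd' : (m.insert (pvN s) (pvD s)).keys.Nodup := by rw [hkeys]; exact hn
        obtain ⟨c1, c2, c3, c4, c5, c6⟩ := ih (m.insert (pvN s) (pvD s)) ord he' hnd'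
        refine ⟨c1, ?_, c3, ?_, ?_, ?_⟩
        · rw [c2]
          simp only [List.map_cons, PySem.Set.update_cons, hadd]
        · intro sp v hv
          rcases c4 sp v hv with h | ⟨s', hs', h1, h2⟩
          · rw [PySem.Dict.get?_insert] at h
            by_cases hsp : sp = pvN s
            · rw [if_pos hsp] at h
              exact Or.inr ⟨s, List.mem_cons_self .., hsp.symm, Option.some.inj h⟩
            · rw [if_neg hsp] at h
              exact Or.inl h
          · exact Or.inr ⟨s', List.mem_cons_of_mem _ hs', h1, h2⟩
        · intro s' hs' v hv
          rcases List.mem_cons.1 hs' with rfl | hmem2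
          · have h1 : (m.insert (pvN s') (pvD s')).get? (pvN s') = some (pvD s') :=
              PySem.Dict.get?_insert_self ..
            exact c6 _ _ h1 v hv
          · exact c5 s' hmem2 v hv
        · intro sp v0 h0 v hv
          by_cases hsp : sp = pvN s
          · have hv0 : v0 = prev := by
              rw [hsp, hm] at h0; exact (Option.some.inj h0).symm
            have h1 : (m.insert (pvN s) (pvD s)).get? sp = some (pvD s) := by
              rw [hsp]; exact PySem.Dict.get?_insert_self ..
            have := c6 sp _ h1 v hv
            rw [hv0]
            exact le_trans this (le_of_lt hlt)
          · have h0' : (m.insert (pvN s) (pvD s)).get? sp = some v0 := by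
              rw [PySem.Dict.get?_insert, if_neg hsp]; exact h0
            exact c6 sp v0 h0' v hv
      · have hstep : pvStepB (m, ord) s = (m, ord) := by
          unfold pvStepB; rw [hm]; simp [hlt]
        rw [hstep]
        obtain ⟨c1, c2, c3, c4, c5, c6⟩ := ih m ord he hn
        refine ⟨c1, ?_, c3, ?_, ?_, c6⟩
        · rw [c2]
          simp only [List.map_cons, PySem.Set.update_cons, hadd]
        · intro sp v hv
          rcases c4 sp v hv with h | ⟨s', hs', h1, h2⟩
          · exact Or.inl h
          · exact Or.inr ⟨s', List.mem_cons_of_mem _ hs', h1, h2⟩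
        · intro s' hs' v hv
          rcases List.mem_cons.1 hs' with rfl | hmem2
          · have := c6 _ _ hm v hv
            exact le_trans this (not_lt.1 hlt)
          · exact c5 s' hmem2 v hv

lemma ord_eq (L : List (List (String × String))) : pvOrd L = PySem.Set.ofList (L.map pvN) := by
  have hK : ([] : List String) = (PySem.Dict.empty : PySem.Dict String String).keys := rfl
  obtain ⟨c1, c2, _, _, _, _⟩ := bfold_inv L PySem.Dict.empty [] hK
    (by rw [← hK]; exact List.nodup_nil)
  unfold pvOrd pvBst
  rw [c1, c2, PySem.Set.update_nil_left]

lemma fd_attained (L : List (List (String × String))) (sp : String) (h : sp ∈ pvOrd L) :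
    ∃ s ∈ L, pvN s = sp ∧ pvFd L sp = pvD s := by
  have hK : ([] : List String) = (PySem.Dict.empty : PySem.Dict String String).keys := rfl
  obtain ⟨c1, _, _, c4, _, _⟩ := bfold_inv L PySem.Dict.empty [] hK
    (by rw [← hK]; exact List.nodup_nil)
  have hk : sp ∈ (pvBst L).1.keys := by
    unfold pvBst
    rw [← c1]
    exact h
  obtain ⟨v, hv⟩ : ∃ v, (pvBst L).1.get? sp = some v := by
    cases hg : (pvBst L).1.get? sp with
    | none => exact absurd ((PySem.Dict.get?_eq_none_iff_not_mem_keys _ _).1 hg) (not_not.2 hk)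
    | some v => exact ⟨v, rfl⟩
  rcases c4 sp v hv with h0 | ⟨s, hs, h1, h2⟩
  · exact absurd h0 (by simp [PySem.Dict.get?_empty])
  · refine ⟨s, hs, h1, ?_⟩
    unfold pvFd
    rw [PySem.Dict.getD_of_get?_eq_some _ _ hv]
    exact h2.symm

lemma fd_le (L : List (List (String × String))) (s : List (String × String)) (h : s ∈ L) :
    pvFd L (pvN s) ≤ pvD s := by
  have hK : ([] : List String) = (PySem.Dict.empty : PySem.Dict String String).keys := rfl
  obtain ⟨c1, c2, _, _, c5, _⟩ := bfold_inv L PySem.Dict.empty [] hK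
    (by rw [← hK]; exact List.nodup_nil)
  have hk : pvN s ∈ (pvBst L).1.keys := by
    unfold pvBst
    rw [c2, PySem.Set.update_nil_left, PySem.Set.mem_ofList]
    exact List.mem_map_of_mem h
  obtain ⟨v, hv⟩ : ∃ v, (pvBst L).1.get? (pvN s) = some v := by
    cases hg : (pvBst L).1.get? (pvN s) with
    | none => exact absurd ((PySem.Dict.get?_eq_none_iff_not_mem_keys _ _).1 hg) (not_not.2 hk)
    | some v => exact ⟨v, rfl⟩
  have := c5 s h v hv
  unfold pvFd
  rw [PySem.Dict.getD_of_get?_eq_some _ _ hv]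
  exact this

-- the main sweep: A's loop over the sorted dates produces B's buckets and running totals
lemma mainLoop (L : List (List (String × String))) :
    ∀ (D : List String) (seen : PySem.Set String) (cs : List Int) (ns : List (List String)),
      D.Pairwise (· < ·) → seen.Nodup →
      (∀ x, x ∈ seen ↔ x ∈ pvOrd L ∧ pvFd L x ∉ D) →
      (D.foldl (pvStepA L) (seen, cs, ns)).2.1 = cs ++ pvCounts (D.map (pvBucket L)) (seen.length : Int)
      ∧ (D.foldl (pvStepA L) (seen, cs, ns)).2.2 = ns ++ D.map (pvBucket L) := by
  intro D
  induction D with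
  | nil =>
    intro seen cs ns _ _ _
    simp [pvCounts]
  | cons d D' ih =>
    intro seen cs ns hp hn hmem
    have hd : ∀ e ∈ D', d < e := (List.pairwise_cons.1 hp).1
    have hp' : D'.Pairwise (· < ·) := (List.pairwise_cons.1 hp).2
    have hdn : ((pvDaily L).getD d PySem.Set.empty).Nodup := daily_nodup L d
    have hordnd : (pvOrd L).Nodup := by rw [ord_eq]; exact PySem.Set.nodup_ofList _
    have hnew : ∀ x, x ∈ PySem.Set.diff ((pvDaily L).getD d PySem.Set.empty) seen ↔
        x ∈ pvOrd L ∧ pvFd L x = d := by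
      intro x
      rw [PySem.Set.mem_diff]
      constructor
      · rintro ⟨hxd, hxs⟩
        obtain ⟨s, hs, hsd, hsn⟩ := (daily_mem L d x).1 hxd
        have hxo : x ∈ pvOrd L := by
          rw [ord_eq, PySem.Set.mem_ofList]
          exact List.mem_map.2 ⟨s, hs, hsn⟩
        have hfle : pvFd L x ≤ d := by
          have h0 := fd_le L s hs
          rw [hsn, hsd] at h0
          exact h0
        have hin : pvFd L x ∈ d :: D' := by
          by_contra hni
          exact hxs ((hmem x).2 ⟨hxo, hni⟩)
        rcases List.mem_cons.1 hin with he | he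
        · exact ⟨hxo, he⟩
        · exact absurd (hd _ he) (not_lt.2 hfle)
      · rintro ⟨hxo, hfd⟩
        obtain ⟨s, hs, hsn, hfe⟩ := fd_attained L x hxo
        refine ⟨(daily_mem L d x).2 ⟨s, hs, ?_, hsn⟩, ?_⟩
        · rw [← hfe]; exact hfd
        · intro hxs
          exact ((hmem x).1 hxs).2 (by rw [hfd]; exact List.mem_cons_self ..)
    have hbmem : ∀ x, x ∈ pvBucket L d ↔ x ∈ pvOrd L ∧ pvFd L x = d := by
      intro x
      unfold pvBucket
      rw [List.mem_filter]
      simp only [beq_iff_eq]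
      rfl
    have hbn : (pvBucket L d).Nodup := hordnd.filter _
    have hnn : (PySem.Set.diff ((pvDaily L).getD d PySem.Set.empty) seen).Nodup :=
      PySem.Set.nodup_diff _ _ hdn
    have hperm : (pvBucket L d).Perm (PySem.Set.diff ((pvDaily L).getD d PySem.Set.empty) seen) :=
      (List.perm_ext_iff_of_nodup hbn hnn).2 (fun a => by rw [hbmem a, hnew a])
    have hpk : (pvBucket L d).Pairwise
        (fun a b => (pvTaxo L).getD a 999999 < (pvTaxo L).getD b 999999) := by
      have h0 := taxo_pairwise L
      rw [← ord_eq] at h0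
      exact List.Pairwise.sublist List.filter_sublist h0
    have hsort : PySem.List.sorted (PySem.Set.diff ((pvDaily L).getD d PySem.Set.empty) seen)
        (fun sp => (pvTaxo L).getD sp 999999) false = pvBucket L d :=
      PySem.List.sorted_eq_of_perm_of_pairwise_lt _ _ _ hperm hpk
    have huni : PySem.Set.union seen ((pvDaily L).getD d PySem.Set.empty) =
        seen ++ PySem.Set.diff ((pvDaily L).getD d PySem.Set.empty) seen := by
      show PySem.Set.update seen ((pvDaily L).getD d PySem.Set.empty) = _
      rw [PySem.Set.update_eq_append_filter, PySem.Set.ofList_eq_self_of_nodup _ hdn]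
      rfl
    have hn' : (seen ++ PySem.Set.diff ((pvDaily L).getD d PySem.Set.empty) seen).Nodup := by
      rw [← huni]
      exact PySem.Set.nodup_union _ _ hn
    have hmem' : ∀ x, x ∈ seen ++ PySem.Set.diff ((pvDaily L).getD d PySem.Set.empty) seen ↔
        x ∈ pvOrd L ∧ pvFd L x ∉ D' := by
      intro x
      rw [List.mem_append]
      constructor
      · rintro (hx | hx)
        · obtain ⟨h1, h2⟩ := (hmem x).1 hx
          exact ⟨h1, fun hh => h2 (List.mem_cons_of_mem _ hh)⟩
        · obtain ⟨h1, h2⟩ := (hnew x).1 hx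
          refine ⟨h1, fun hh => ?_⟩
          rw [h2] at hh
          exact absurd (hd _ hh) (lt_irrefl d)
      · rintro ⟨h1, h2⟩
        by_cases hfd : pvFd L x = d
        · exact Or.inr ((hnew x).2 ⟨h1, hfd⟩)
        · refine Or.inl ((hmem x).2 ⟨h1, ?_⟩)
          intro hh
          rcases List.mem_cons.1 hh with he | he
          · exact hfd he
          · exact h2 he
    have hlenb : (pvBucket L d).length =
        (PySem.Set.diff ((pvDaily L).getD d PySem.Set.empty) seen).length := hperm.length_eq
    have hlen : PySem.Set.len (PySem.Set.union seen ((pvDaily L).getD d PySem.Set.empty)) =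
        (seen.length : Int) + PySem.List.len (pvBucket L d) := by
      rw [huni]
      show ((seen ++ PySem.Set.diff ((pvDaily L).getD d PySem.Set.empty) seen).length : Int) = _
      simp only [List.length_append, PySem.List.len_eq, ← hlenb]
      push_cast
      ring
    have hstep : pvStepA L (seen, cs, ns) d =
        (seen ++ PySem.Set.diff ((pvDaily L).getD d PySem.Set.empty) seen,
         cs ++ [(seen.length : Int) + PySem.List.len (pvBucket L d)],
         ns ++ [pvBucket L d]) := by
      unfold pvStepA
      rw [hsort, hlen, huni]
    rw [List.foldl_cons, hstep]
    obtain ⟨g1, g2⟩ := ih (seen ++ PySem.Set.diff ((pvDaily L).getD d PySem.Set.empty) seen)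
      (cs ++ [(seen.length : Int) + PySem.List.len (pvBucket L d)])
      (ns ++ [pvBucket L d]) hp' hn' hmem'
    have hlen2 : (((seen ++ PySem.Set.diff ((pvDaily L).getD d PySem.Set.empty) seen)).length : Int) =
        (seen.length : Int) + PySem.List.len (pvBucket L d) := by
      simp only [List.length_append, PySem.List.len_eq, ← hlenb]
      push_cast
      ring
    constructor
    · rw [g1, hlen2]
      simp [pvCounts, List.append_assoc]
    · rw [g2]
      simp [List.append_assoc]

-- ===== VERDICT (by name: the statement is the Claim_ definition above) =====
theorem build_cumulative_data_py_spec : Claim_equal_build_cumulative_data_py := by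
  intro L _ _
  unfold Spec_build_cumulative_data_py
  rw [portA_eq, portB_eq]
  have hdates : PySem.List.sorted (pvDaily L).keys (fun x => x) false = pvDates L := by
    rw [daily_keys]; rfl
  have hpw : (pvDates L).Pairwise (· < ·) := by
    have := PySem.List.sorted_ofList_pairwise_lt (xs := L.map pvD)
    exact this
  have hmem0 : ∀ x : String, x ∈ (PySem.Set.empty : PySem.Set String) ↔ x ∈ pvOrd L ∧ pvFd L x ∉ pvDates L := by
    intro x
    constructor
    · intro hx; cases hx
    · rintro ⟨hx, hnd⟩
      exfalso; apply hnd
      obtain ⟨s, hs, _, hfd⟩ := fd_attained L x hx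
      have : pvFd L x ∈ L.map pvD := by
        rw [hfd]; exact List.mem_map_of_mem hs
      have : pvFd L x ∈ PySem.Set.ofList (L.map pvD) := (PySem.Set.mem_ofList _ _).2 this
      unfold pvDates
      rw [PySem.List.mem_sorted]
      exact this
  obtain ⟨h1, h2⟩ := mainLoop L (pvDates L) PySem.Set.empty [] [] hpw (by simp [PySem.Set.empty]) hmem0
  rw [hdates, h1, h2, countsB_eq]
  simp
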